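-- pv_equiv track=rewrite | github.com/pypi-data/pypi-mirror-324 | packages/benlink/benlink-0.1.0-py3-none-any.whl/benlink/protocol/command/bitfield.py | reorder_pairs
-- ===== SOURCE A (Python) =====
-- import typing as t
--
-- def reorder_pairs(order: t.Sequence[int], size: int):
--     if not all(i < size for i in order) or not all(i >= 0 for i in order):
--         raise ValueError(
--             f"some indices in the reordering are out-of-bounds"
--         )
--
--     order_set = frozenset(order)
--
--     if len(order_set) != len(order):
--         raise ValueError(
--             f"duplicate indices in reordering"
--         )
--
--     return zip(
--         range(size),
--         (*order, *(i for i in range(size) if i not in order_set))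
--     )
-- ===== SOURCE B (Python) =====
-- def reorder_pairs(order, size):
--     srt = sorted(order)
--     if srt and (srt[0] < 0 or srt[-1] >= size):
--         raise ValueError(
--             "some indices in the reordering are out-of-bounds"
--         )
--     for a, b in zip(srt, srt[1:]):
--         if a == b:
--             raise ValueError(
--                 "duplicate indices in reordering"
--             )
--     comp = []
--     it = iter(srt)
--     nxt = next(it, None)
--     for k in range(size):
--         if nxt == k:
--             nxt = next(it, None)
--         else:
--             comp.append(k)
--     return zip(range(size), (*order, *comp))
-- ===== Notes on version B (the rewrite author's own statement) =====
-- stated objective: alternative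
-- what changed: B sorts the order once and replaces A's frozenset entirely: bounds are checked on the sorted min/max, duplicates are detected as equal adjacent sorted elements, and the complement is produced by a two-pointer merge of the sorted list against range(size) instead of per-element set-membership filtering.
import Mathlib
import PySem

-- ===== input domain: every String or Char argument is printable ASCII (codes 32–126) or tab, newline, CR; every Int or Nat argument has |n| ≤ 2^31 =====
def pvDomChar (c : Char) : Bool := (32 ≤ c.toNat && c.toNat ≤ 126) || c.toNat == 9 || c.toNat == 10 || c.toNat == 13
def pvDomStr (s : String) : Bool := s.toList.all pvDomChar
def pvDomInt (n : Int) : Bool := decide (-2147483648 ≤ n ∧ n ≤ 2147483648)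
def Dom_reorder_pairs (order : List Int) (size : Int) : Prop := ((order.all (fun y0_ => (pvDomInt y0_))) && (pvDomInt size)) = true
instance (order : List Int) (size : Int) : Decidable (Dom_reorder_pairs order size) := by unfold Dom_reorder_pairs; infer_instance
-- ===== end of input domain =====

-- B sorts `order` once and drops A's frozenset: bounds checked on the sorted
-- min/max, duplicates as equal adjacent sorted elements, and the complement
-- built by a two-pointer merge of the sorted list against range(size)
-- (objective: alternative — sort-then-merge instead of hash-set filtering).

-- ===== PORT A =====
-- A's `zip(range(size), (*order, *(i for i in range(size) if i not in order_set)))`;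
-- the two ValueError branches are excluded by Pre_reorder_pairs below.
def reorder_pairs (order : List Int) (size : Int) : List (Int × Int) :=
  let order_set : PySem.Set Int := PySem.Set.ofList order
  (PySem.List.pyRange 0 size 1).zip
    (order ++ (PySem.List.pyRange 0 size 1).filter
        (fun i => !(PySem.Set.contains order_set i)))

-- ===== PORT B =====
-- `srt = sorted(order)`, then the merge loop `for k in range(size)`; the Python
-- iterator with `nxt = next(it, None)` is ported as the list of not-yet-consumed
-- sorted elements (so `nxt == k` is `remaining.head? = some k` — exact, since
-- None never equals an int). The raises are excluded by Pre_reorder_pairs.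
def reorder_pairs_alt (order : List Int) (size : Int) : List (Int × Int) :=
  let srt : List Int := PySem.List.sorted order (fun x => x) false
  let fin : List Int × List Int :=
    (PySem.List.pyRange 0 size 1).foldl
      (fun (st : List Int × List Int) k =>
        if st.1.head? = some k then (st.1.tail, st.2) else (st.1, st.2 ++ [k]))
      (srt, [])
  (PySem.List.pyRange 0 size 1).zip (order ++ fin.2)

-- ===== PRECONDITION & SPEC =====
-- Pre_ excludes exactly the inputs where A raises ValueError: an index of `order`
-- out of [0, size) (bounds error) or a duplicate index (duplicate error).
def Pre_reorder_pairs (order : List Int) (size : Int) : Prop :=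
  (∀ i ∈ order, 0 ≤ i ∧ i < size) ∧ order.Nodup
instance (order : List Int) (size : Int) : Decidable (Pre_reorder_pairs order size) := by
  unfold Pre_reorder_pairs; infer_instance

def pvWitness_reorder_pairs : List Int × Int := ([2, 0], 4)

def Spec_reorder_pairs (order : List Int) (size : Int) (out : List (Int × Int)) : Prop := out = reorder_pairs_alt order size
instance (order : List Int) (size : Int) (out : List (Int × Int)) : Decidable (Spec_reorder_pairs order size out) := by unfold Spec_reorder_pairs; infer_instance

-- ===== CLAIM (what is proved, stated in full; the proofs are below) =====
def Claim_equal_reorder_pairs : Prop := ∀ (order : List Int) (size : Int), Dom_reorder_pairs order size → Pre_reorder_pairs order size → Spec_reorder_pairs order size (reorder_pairs order size)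

-- ===== LEMMAS AND PROOFS =====

-- the two-pointer merge of a strictly increasing list s (all elements in [a,b))
-- against pyRange a b 1 collects exactly the range elements not in s
theorem merge_comp (b a : Int) (s acc : List Int)
    (hs : s.Pairwise (· < ·)) (hb : ∀ j ∈ s, a ≤ j ∧ j < b) :
    ((PySem.List.pyRange a b 1).foldl
      (fun (st : List Int × List Int) k =>
        if st.1.head? = some k then (st.1.tail, st.2) else (st.1, st.2 ++ [k]))
      (s, acc)).2
    = acc ++ (PySem.List.pyRange a b 1).filter (fun k => !decide (k ∈ s)) := by
  by_cases hab : a < b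
  · rw [PySem.List.pyRange_one_cons hab]
    simp only [List.foldl_cons, List.filter_cons]
    cases s with
    | nil =>
      simp only [List.head?_nil, reduceCtorEq, if_false]
      rw [merge_comp b (a + 1) [] (acc ++ [a]) (by simp) (by simp)]
      simp
    | cons j t =>
      have hja : a ≤ j := (hb j (List.mem_cons_self ..)).1
      by_cases hj : j = a
      · subst hj
        simp only [List.head?_cons, List.tail_cons, if_true]
        have hd : (!decide (j ∈ j :: t)) = false := by simp
        rw [merge_comp b (j + 1) t acc (hs.sublist (List.sublist_cons_self ..))
          (fun x hx => ⟨by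
            have := List.rel_of_pairwise_cons hs hx
            omega, (hb x (List.mem_cons_of_mem _ hx)).2⟩)]
        rw [hd]
        simp only [Bool.false_eq_true, if_false]
        congr 1
        refine List.filter_congr (fun k hk => ?_)
        have hk1 : j + 1 ≤ k := ((PySem.List.mem_pyRange_one).1 hk).1
        simp only [List.mem_cons]
        rw [Bool.eq_iff_iff]
        simp only [Bool.not_eq_true', decide_eq_false_iff_not]
        constructor
        · intro h hc
          rcases hc with h1 | h1
          · omega
          · exact h h1
        · exact fun h hc => h (Or.inr hc)
      · have hgt : a < j := by omega
        simp only [List.head?_cons, Option.some.injEq, if_neg (by omega : ¬ j = a)]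
        have hnm : (!decide (a ∈ j :: t)) = true := by
          simp only [Bool.not_eq_eq_eq_not, Bool.not_true, decide_eq_false_iff_not]
          intro hmem
          rcases List.mem_cons.1 hmem with h | h
          · omega
          · have := List.rel_of_pairwise_cons hs h; omega
        rw [merge_comp b (a + 1) (j :: t) (acc ++ [a]) hs
          (fun x hx => ⟨by
            rcases List.mem_cons.1 hx with h | h
            · omega
            · have := List.rel_of_pairwise_cons hs h; omega,
           (hb x hx).2⟩)]
        rw [hnm]
        simp
  · rw [PySem.List.pyRange_one_eq_nil (by omega)]
    simp
termination_by (b - a).toNat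
decreasing_by all_goals omega

theorem reorder_pairs_spec : Claim_equal_reorder_pairs := by
  intro order size _ hpre
  obtain ⟨hbound, hnodup⟩ := hpre
  unfold Spec_reorder_pairs reorder_pairs reorder_pairs_alt
  simp only
  have hperm : (PySem.List.sorted order (fun x => x) false).Perm order :=
    PySem.List.sorted_perm ..
  have hsorted : (PySem.List.sorted order (fun x => x) false).Pairwise (· < ·) := by
    have hle := PySem.List.sorted_pairwise order (fun x => x)
    have hnd : (PySem.List.sorted order (fun x => x) false).Nodup := hperm.nodup_iff.2 hnodup
    exact hle.imp₂ (fun a b hab hne => lt_of_le_of_ne hab hne) hnd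
  rw [merge_comp size 0 (PySem.List.sorted order (fun x => x) false) []
      hsorted (fun j hj => hbound j (hperm.mem_iff.1 hj))]
  simp only [List.nil_append]
  congr 2
  refine List.filter_congr (fun k _ => ?_)
  have : PySem.Set.contains (PySem.Set.ofList order) k = decide (k ∈ order) := by
    rw [Bool.eq_iff_iff]
    simp [PySem.Set.mem_ofList]
  rw [this]
  congr 1
  simp [hperm.mem_iff]
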